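-- pv_equiv track=rewrite | github.com/johnteye/CampIIcontests | A_Cirno_s_Perfect_Bitmasks_Classroom.py | solution
-- ===== SOURCE A (Python) =====
-- def solution(num):
--     if num == 1:
--         return 3
--
--     if bin(num).count("1") == 1:
--         return num + 1
--
--     i = 0
--     while num & (1 << i) == 0:
--         i += 1
--
--     return 1 << i
-- ===== SOURCE B (Python) =====
-- # B: closed-form bit arithmetic (num & -num for the lowest set bit, a & (a-1) == 0 for the
-- # single-bit test) instead of A's string-based popcount and incremental bit-scan loop.
-- def solution(num):
--     if num == 1:
--         return 3
--     a = abs(num)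
--     if a & (a - 1) == 0:
--         return num + 1
--     return num & -num
-- ===== Notes on version B (the rewrite author's own statement) =====
-- stated objective: idiomatic
-- what changed: Replaces the bin(num) string build + '1'-count with the arithmetic single-bit test a & (a-1) == 0 on abs(num), and replaces the incremental while-loop bit scan with the closed form num & -num for the lowest set bit, making B loopless; Pre_ excludes num = 0, on which A's scan loop never terminates.
-- outside the precondition, e.g. on solution(0): A does not finish within the time limit, B returns 1
import Mathlib
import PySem

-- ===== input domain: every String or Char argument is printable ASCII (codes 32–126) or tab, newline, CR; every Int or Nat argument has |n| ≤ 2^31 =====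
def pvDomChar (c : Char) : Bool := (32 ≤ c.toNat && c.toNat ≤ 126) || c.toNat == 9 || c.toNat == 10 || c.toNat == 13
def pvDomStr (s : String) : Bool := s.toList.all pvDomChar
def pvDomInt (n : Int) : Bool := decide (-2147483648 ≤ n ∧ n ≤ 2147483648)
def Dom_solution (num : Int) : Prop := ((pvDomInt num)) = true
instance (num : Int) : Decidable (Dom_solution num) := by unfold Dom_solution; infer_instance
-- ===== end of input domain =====

-- B replaces A's bin-string popcount test and incremental bit-scan loop by the closed forms
-- a & (a-1) == 0 and num & -num (loopless); equivalence is proved for all num ≠ 0 in the domain.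

-- ===== PORT A =====
-- the 'while num & (1 << i) == 0: i += 1' loop; fuel only makes it total (64 > any bit index
-- of a nonzero |num| ≤ 2^31, so the fuel branch is never reached on Pre_)
def solutionLoop (num : Int) : Nat → Nat → Int
  | i, 0 => (1 : Int) <<< i
  | i, fuel+1 =>
    if PySem.Int.band num ((1 : Int) <<< i) == 0 then solutionLoop num (i+1) fuel
    else (1 : Int) <<< i

def solution (num : Int) : Int :=
  if num == 1 then 3
  else if PySem.Int.bitCount num == 1 then num + 1
    -- bin(num).count("1") = number of '1' binary digits of |num|, exactly PySem.Int.bitCount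
  else solutionLoop num 0 64

-- ===== PORT B =====
def solution_alt (num : Int) : Int :=
  if num == 1 then 3
  else
    let a : Int := |num|
    if PySem.Int.band a (a - 1) == 0 then num + 1
    else PySem.Int.band num (-num)

-- ===== PRECONDITION & SPEC =====
-- Pre_ excludes exactly num = 0, on which A's scan loop never terminates (A diverges there).
def Pre_solution (num : Int) : Prop := num ≠ 0
instance (num : Int) : Decidable (Pre_solution num) := by unfold Pre_solution; infer_instance
def pvWitness_solution : Int := (6)

def Spec_solution (num : Int) (out : Int) : Prop := out = solution_alt num
instance (num : Int) (out : Int) : Decidable (Spec_solution num out) := by unfold Spec_solution; infer_instance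

-- ===== CLAIM (what is proved, stated in full; the proofs are below) =====
def Claim_equal_solution : Prop := ∀ (num : Int), Dom_solution num → Pre_solution num → Spec_solution num (solution num)

-- ===== LEMMAS AND PROOFS =====

-- doubling laws for Nat.land, from Nat.land_bit
theorem pvLand_ee (a b : Nat) : 2*a &&& 2*b = 2*(a &&& b) := by
  simpa [Nat.bit_val] using Nat.land_bit false a false b
theorem pvLand_eo (a b : Nat) : 2*a &&& (2*b+1) = 2*(a &&& b) := by
  simpa [Nat.bit_val] using Nat.land_bit false a true b
theorem pvLand_oe (a b : Nat) : (2*a+1) &&& 2*b = 2*(a &&& b) := by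
  simpa [Nat.bit_val] using Nat.land_bit true a false b
theorem pvLand_oo (a b : Nat) : (2*a+1) &&& (2*b+1) = 2*(a &&& b) + 1 := by
  simpa [Nat.bit_val] using Nat.land_bit true a true b

theorem pvLand_self (a : Nat) : a &&& a = a := Nat.and_self a
theorem pvLand_zero (a : Nat) : a &&& 0 = 0 := Nat.and_zero a
-- bit picture of n = 2^t*(2m+1) and n-1 against single powers of two
theorem pvLand_pow_lt (t m i : Nat) (h : i < t) : 2^t*(2*m+1) &&& 2^i = 0 := by
  induction i generalizing t with
  | zero =>
    obtain ⟨t', rfl⟩ : ∃ t', t = t'+1 := ⟨t-1, by omega⟩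
    rw [show 2^(t'+1)*(2*m+1) = 2*(2^t'*(2*m+1)) by ring,
        show (2:Nat)^0 = 2*0+1 by norm_num, pvLand_eo, pvLand_zero]
  | succ i ih =>
    obtain ⟨t', rfl⟩ : ∃ t', t = t'+1 := ⟨t-1, by omega⟩
    rw [show 2^(t'+1)*(2*m+1) = 2*(2^t'*(2*m+1)) by ring,
        show (2:Nat)^(i+1) = 2*2^i by ring, pvLand_ee, ih t' (by omega)]
theorem pvLand_pow_self (t m : Nat) : 2^t*(2*m+1) &&& 2^t = 2^t := by
  induction t with
  | zero =>
    rw [show (2:Nat)^0*(2*m+1) = 2*m+1 by ring, show (2:Nat)^0 = 2*0+1 by norm_num,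
        pvLand_oo, pvLand_zero]
  | succ t ih =>
    rw [show 2^(t+1)*(2*m+1) = 2*(2^t*(2*m+1)) by ring,
        show (2:Nat)^(t+1) = 2*2^t by ring, pvLand_ee, ih]
theorem pvLand_pred_pow_lt (t m i : Nat) (h : i < t) : (2^t*(2*m+1) - 1) &&& 2^i = 2^i := by
  induction i generalizing t with
  | zero =>
    obtain ⟨t', rfl⟩ : ∃ t', t = t'+1 := ⟨t-1, by omega⟩
    have h1 : (1:Nat) ≤ 2^t'*(2*m+1) := Nat.one_le_iff_ne_zero.mpr (by positivity)
    rw [show 2^(t'+1)*(2*m+1) - 1 = 2*(2^t'*(2*m+1) - 1)+1 by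
          have h2 : 2^(t'+1)*(2*m+1) = 2*(2^t'*(2*m+1)) := by ring
          omega,
        show (2:Nat)^0 = 2*0+1 by norm_num, pvLand_oo, pvLand_zero]
  | succ i ih =>
    obtain ⟨t', rfl⟩ : ∃ t', t = t'+1 := ⟨t-1, by omega⟩
    have h1 : (1:Nat) ≤ 2^t'*(2*m+1) := Nat.one_le_iff_ne_zero.mpr (by positivity)
    rw [show 2^(t'+1)*(2*m+1) - 1 = 2*(2^t'*(2*m+1) - 1)+1 by
          have h2 : 2^(t'+1)*(2*m+1) = 2*(2^t'*(2*m+1)) := by ring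
          omega,
        show (2:Nat)^(i+1) = 2*2^i by ring, pvLand_oe, ih t' (by omega)]
theorem pvLand_pred_pow_self (t m : Nat) : (2^t*(2*m+1) - 1) &&& 2^t = 0 := by
  induction t with
  | zero =>
    rw [show (2:Nat)^0*(2*m+1) - 1 = 2*m by omega, show (2:Nat)^0 = 2*0+1 by norm_num,
        pvLand_eo, pvLand_zero]
  | succ t ih =>
    have h1 : (1:Nat) ≤ 2^t*(2*m+1) := Nat.one_le_iff_ne_zero.mpr (by positivity)
    rw [show 2^(t+1)*(2*m+1) - 1 = 2*(2^t*(2*m+1) - 1)+1 by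
          have h2 : 2^(t+1)*(2*m+1) = 2*(2^t*(2*m+1)) := by ring
          omega,
        show (2:Nat)^(t+1) = 2*2^t by ring, pvLand_oe, ih]
theorem pvLand_pred (t m : Nat) : 2^t*(2*m+1) &&& (2^t*(2*m+1) - 1) = 2^(t+1)*m := by
  induction t with
  | zero =>
    rw [show (2:Nat)^0*(2*m+1) = 2*m+1 by ring]
    rw [show (2:Nat)*m+1 - 1 = 2*m by omega, pvLand_oe, pvLand_self]
    ring
  | succ t ih =>
    have h1 : (1:Nat) ≤ 2^t*(2*m+1) := Nat.one_le_iff_ne_zero.mpr (by positivity)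
    rw [show 2^(t+1)*(2*m+1) = 2*(2^t*(2*m+1)) by ring]
    rw [show 2*(2^t*(2*m+1)) - 1 = 2*(2^t*(2*m+1) - 1)+1 by omega, pvLand_eo, ih]
    ring

-- bitCount facts
theorem pvBitCount_pos (m : Nat) (h : m ≠ 0) : PySem.Int.bitCount (m : Int) ≠ 0 := by
  induction m using Nat.strong_induction_on with
  | _ m ih =>
    rw [PySem.Int.bitCount_natCast (by omega)]
    rcases Nat.mod_two_eq_zero_or_one m with h2 | h2
    · have hm2 : m / 2 ≠ 0 := by omega
      have := ih (m/2) (by omega) hm2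
      omega
    · omega
theorem pvBitCount_pow_mul (t m : Nat) :
    PySem.Int.bitCount ((2^t*(2*m+1) : Nat) : Int) = 1 + PySem.Int.bitCount (m : Int) := by
  induction t with
  | zero =>
    rw [show (2:Nat)^0*(2*m+1) = 2*m+1 by ring,
        PySem.Int.bitCount_natCast (by omega),
        show (2*m+1)%2 = 1 by omega, show (2*m+1)/2 = m by omega]
  | succ t ih =>
    rw [show 2^(t+1)*(2*m+1) = 2*(2^t*(2*m+1)) by ring,
        PySem.Int.bitCount_natCast (by positivity),
        show 2*(2^t*(2*m+1))%2 = 0 by omega, show 2*(2^t*(2*m+1))/2 = 2^t*(2*m+1) by omega,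
        ih]
    omega

-- evaluating PySem.Int.band at the sign patterns that occur
theorem pvBand_pos_pow (n : Nat) (i : Nat) :
    PySem.Int.band ((n : Nat) : Int) ((1:Int) <<< i) = ((n &&& 2^i : Nat) : Int) := by
  rw [show (1:Int) <<< i = ((2^i : Nat) : Int) by simp [Int.shiftLeft_eq],
      PySem.Int.band_natCast]
theorem pvBand_neg_pow (n : Nat) (hn : n ≠ 0) (i : Nat) :
    PySem.Int.band (-(n : Int)) ((1:Int) <<< i) = ((2^i - (2^i &&& (n-1)) : Nat) : Int) := by
  have hpos : (0:Int) < (n:Int) := by exact_mod_cast Nat.pos_of_ne_zero hn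
  rw [show (1:Int) <<< i = ((2^i : Nat) : Int) by simp [Int.shiftLeft_eq]]
  simp only [PySem.Int.band]
  rw [if_neg (by omega), if_pos (by positivity)]
  simp only [neg_neg, Int.toNat_natCast]
  rw [show ((n:Int) - 1) = ((n-1 : Nat) : Int) by omega, Int.toNat_natCast]
theorem pvBand_lowbit_pos (n : Nat) (hn : n ≠ 0) :
    PySem.Int.band ((n:Nat):Int) (-((n:Nat):Int)) = ((n - (n &&& (n-1)) : Nat) : Int) := by
  have hpos : (0:Int) < (n:Int) := by exact_mod_cast Nat.pos_of_ne_zero hn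
  simp only [PySem.Int.band]
  rw [if_pos (by omega), if_neg (by omega)]
  rw [show (-(-((n:Nat):Int)) - 1) = ((n - 1 : Nat) : Int) by omega]
  simp

theorem pvBand_lowbit_neg (n : Nat) (hn : n ≠ 0) :
    PySem.Int.band (-((n:Nat):Int)) ((n:Nat):Int) = ((n - (n &&& (n-1)) : Nat) : Int) := by
  have hpos : (0:Int) < (n:Int) := by exact_mod_cast Nat.pos_of_ne_zero hn
  simp only [PySem.Int.band]
  rw [if_neg (by omega), if_pos (by omega)]
  rw [show (-(-((n:Nat):Int)) - 1) = ((n - 1 : Nat) : Int) by omega]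
  simp

theorem pvBand_lowbit (num : Int) (hnum : num ≠ 0) :
    PySem.Int.band num (-num) = ((num.natAbs - (num.natAbs &&& (num.natAbs - 1)) : Nat) : Int) := by
  obtain ⟨n, hn', hc⟩ : ∃ n : Nat, n ≠ 0 ∧ (num = ↑n ∨ num = -↑n) :=
    ⟨num.natAbs, Int.natAbs_ne_zero.mpr hnum, Int.natAbs_eq num⟩
  have ha : num.natAbs = n := by rcases hc with rfl | rfl <;> simp
  rw [ha]
  rcases hc with rfl | rfl
  · exact pvBand_lowbit_pos n hn'
  · rw [neg_neg]
    exact pvBand_lowbit_neg n hn'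

-- the loop reaches the lowest set bit
theorem pvLoop_eq (num : Int) (t m : Nat) (h : num.natAbs = 2^t*(2*m+1)) :
    ∀ fuel i, i ≤ t → t - i < fuel → solutionLoop num i fuel = ((2^t : Nat) : Int) := by
  have hn : num.natAbs ≠ 0 := by rw [h]; positivity
  have hcond : ∀ i, i ≤ t →
      PySem.Int.band num ((1:Int) <<< i) = (if i = t then ((2^t : Nat) : Int) else 0) := by
    intro i hi
    rcases Int.natAbs_eq num with hc | hc
    · rw [hc, pvBand_pos_pow, h]
      rcases Nat.lt_or_ge i t with hlt | hge
      · rw [if_neg (by omega), pvLand_pow_lt t m i hlt]; norm_num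
      · have hit : i = t := by omega
        subst hit
        rw [if_pos rfl, pvLand_pow_self]
    · rw [hc, pvBand_neg_pow _ hn, h]
      rcases Nat.lt_or_ge i t with hlt | hge
      · rw [if_neg (by omega), Nat.land_comm, pvLand_pred_pow_lt t m i hlt]
        norm_num
      · have hit : i = t := by omega
        subst hit
        rw [if_pos rfl, Nat.land_comm, pvLand_pred_pow_self, Nat.sub_zero]
  intro fuel
  induction fuel with
  | zero => intro i h1 h2; omega
  | succ f ih =>
    intro i hi hf
    simp only [solutionLoop]
    rcases Nat.lt_or_ge i t with hlt | hge
    · rw [hcond i hi, if_neg (show ¬ i = t from by omega)]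
      simp only [beq_self_eq_true, if_true]
      exact ih (i+1) (by omega) (by omega)
    · have hit : i = t := by omega
      rw [hcond i hi, if_pos hit]
      rw [if_neg (by simp), hit]
      simp [Int.shiftLeft_eq]

-- ===== VERDICT (by name: the statement is the Claim_ definition above) =====
theorem solution_spec : Claim_equal_solution := by
  intro num hdom hpre
  have hdom' : -2147483648 ≤ num ∧ num ≤ 2147483648 := by
    simpa [Dom_solution, pvDomInt] using hdom
  unfold Spec_solution solution solution_alt
  by_cases h1 : num = 1
  · simp [h1]
  · have hn : num.natAbs ≠ 0 := Int.natAbs_ne_zero.mpr hpre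
    obtain ⟨t, m', hodd, hrep⟩ := Nat.exists_eq_two_pow_mul_odd hn
    obtain ⟨m, rfl⟩ := hodd
    -- A's popcount condition
    have hbc : PySem.Int.bitCount num = 1 + PySem.Int.bitCount (m : Int) := by
      rcases Int.natAbs_eq num with hc | hc
      · rw [hc, hrep]; exact_mod_cast pvBitCount_pow_mul t m
      · rw [hc, PySem.Int.bitCount_neg, hrep]; exact_mod_cast pvBitCount_pow_mul t m
    -- B's single-bit condition
    have habs : |num| = ((num.natAbs : Nat) : Int) := Int.abs_eq_natAbs num
    have hb : PySem.Int.band |num| (|num| - 1) = ((2^(t+1)*m : Nat) : Int) := by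
      have hpos : (0:Int) < ((num.natAbs : Nat) : Int) := by
        exact_mod_cast Nat.pos_of_ne_zero hn
      rw [habs, show ((num.natAbs : Nat) : Int) - 1 = ((num.natAbs - 1 : Nat) : Int) by omega,
          PySem.Int.band_natCast, hrep, pvLand_pred]
    by_cases hm : m = 0
    · subst hm
      have hA : (PySem.Int.bitCount num == 1) = true := by
        simp [hbc, PySem.Int.bitCount_zero]
      have hB : (PySem.Int.band |num| (|num| - 1) == 0) = true := by
        simp [hb]
      simp only [beq_iff_eq] at hA hB
      simp [h1, hA, hB]
    · have hA : ¬ (PySem.Int.bitCount num = 1) := by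
        have h := pvBitCount_pos m hm
        rw [hbc]
        omega
      have hB : ¬ (PySem.Int.band |num| (|num| - 1) = 0) := by
        rw [hb]
        have : (2:Nat)^(t+1)*m ≠ 0 := by positivity
        exact_mod_cast this
      -- size of t from the domain bound
      have hbound : num.natAbs ≤ 2147483648 := by omega
      have h2t : 2^t ≤ 2147483648 := by
        calc 2^t ≤ 2^t*(2*m+1) := Nat.le_mul_of_pos_right _ (by omega)
        _ = num.natAbs := hrep.symm
        _ ≤ 2147483648 := hbound
      have ht31 : t ≤ 31 := by
        by_contra hc
        have : (4294967296:Nat) ≤ 2^t := by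
          calc (4294967296:Nat) = 2^32 := by norm_num
          _ ≤ 2^t := Nat.pow_le_pow_right (by norm_num) (by omega)
        omega
      have hloop : solutionLoop num 0 64 = ((2^t : Nat) : Int) :=
        pvLoop_eq num t m hrep 64 0 (by omega) (by omega)
      have hlow : PySem.Int.band num (-num) = ((2^t : Nat) : Int) := by
        rw [pvBand_lowbit num hpre, hrep, pvLand_pred,
            show 2^t*(2*m+1) - 2^(t+1)*m = 2^t from
              Nat.sub_eq_of_eq_add (by ring)]
      simp [h1, hA, hB, hloop, hlow]
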